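-- pv_equiv track=rewrite | github.com/forkiron/aesopic-assignment | aesopic_assignment/vision.py | _normalize_notes
-- ===== SOURCE A (Python) =====
-- from typing import Any, Dict, List, Optional
--
-- def _normalize_notes(notes: str) -> str:
--     """Collapse runs of blank lines to one; trim each line and the whole string."""
--     if not notes or not notes.strip():
--         return notes
--     lines = [line.strip() for line in notes.splitlines()]
--     out: List[str] = []
--     prev_blank = False
--     for ln in lines:
--         if not ln:
--             if not prev_blank:
--                 out.append("")
--             prev_blank = True
--             continue
--         prev_blank = False
--         out.append(ln)
--     return "\n".join(out).strip()
-- ===== SOURCE B (Python) =====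
-- from typing import List
--
-- def _normalize_notes(notes: str) -> str:
--     """Collapse runs of blank lines to one; trim each line and the whole string."""
--     if not notes or not notes.strip():
--         return notes
--     paragraphs: List[List[str]] = []
--     current: List[str] = []
--     for line in notes.splitlines():
--         ln = line.strip()
--         if ln:
--             current.append(ln)
--         elif current:
--             paragraphs.append(current)
--             current = []
--     if current:
--         paragraphs.append(current)
--     return "\n\n".join("\n".join(p) for p in paragraphs)
-- ===== Notes on version B (the rewrite author's own statement) =====
-- stated objective: alternative
-- what changed: Replaces A's stateful prev_blank collapse loop plus final join-and-strip by grouping the stripped lines into paragraphs (lists of non-blank lines) and joining the paragraphs with a literal blank line ('\n\n'.join), so no blank-line markers are emitted and no final strip is needed.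
import Mathlib
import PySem

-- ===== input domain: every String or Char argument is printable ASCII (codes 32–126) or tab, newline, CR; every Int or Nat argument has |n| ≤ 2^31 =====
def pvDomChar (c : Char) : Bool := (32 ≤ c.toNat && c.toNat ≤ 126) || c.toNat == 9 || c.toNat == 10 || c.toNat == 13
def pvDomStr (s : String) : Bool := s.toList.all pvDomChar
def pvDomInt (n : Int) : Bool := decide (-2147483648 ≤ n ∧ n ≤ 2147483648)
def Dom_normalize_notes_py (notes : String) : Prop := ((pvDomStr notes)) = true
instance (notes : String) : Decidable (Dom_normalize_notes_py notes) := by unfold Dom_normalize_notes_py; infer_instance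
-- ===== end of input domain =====

-- B replaces A's stateful prev_blank collapse loop plus final join-and-strip by grouping the
-- stripped lines into paragraphs and joining the paragraphs with "\n\n" (objective: alternative
-- algorithm of the same cost); the return values are proved equal on all inputs.

-- ===== PORT A =====
def normalize_notes_py (notes : String) : String :=
  if notes = "" ∨ PySem.Str.strip notes = "" then notes
  else
    let lines := (PySem.Str.splitlines notes).map (fun line => PySem.Str.strip line)
    let st := lines.foldl (fun (st : List String × Bool) ln =>
        if ln = "" then (if st.2 then st.1 else st.1 ++ [""], true)
        else (st.1 ++ [ln], false)) ([], false)
    PySem.Str.strip (PySem.Str.join "\n" st.1)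

-- ===== PORT B =====
def normalize_notes_py_alt (notes : String) : String :=
  if notes = "" ∨ PySem.Str.strip notes = "" then notes
  else
    let st := (PySem.Str.splitlines notes).foldl
      (fun (st : List (List String) × List String) line =>
        let ln := PySem.Str.strip line
        if ln ≠ "" then (st.1, st.2 ++ [ln])
        else if st.2 ≠ [] then (st.1 ++ [st.2], [])
        else st) ([], [])
    let paragraphs := if st.2 ≠ [] then st.1 ++ [st.2] else st.1
    PySem.Str.join "\n\n" (paragraphs.map (fun p => PySem.Str.join "\n" p))

-- ===== PRECONDITION & SPEC =====
def Spec_normalize_notes_py (notes : String) (out : String) : Prop := out = normalize_notes_py_alt notes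
instance (notes : String) (out : String) : Decidable (Spec_normalize_notes_py notes out) := by unfold Spec_normalize_notes_py; infer_instance

-- ===== CLAIM (what is proved, stated in full; the proofs are below) =====
def Claim_equal_normalize_notes_py : Prop := ∀ (notes : String), Dom_normalize_notes_py notes → Spec_normalize_notes_py notes (normalize_notes_py notes)

-- ===== LEMMAS AND PROOFS =====

def pvGG : Bool → List String → List String
  | _, [] => []
  | pb, s :: t => if s = "" then (if pb then pvGG true t else "" :: pvGG true t) else s :: pvGG false t

def pvHH : List String → List String → List (List String)
  | cur, [] => if cur = [] then [] else [cur]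
  | cur, s :: t => if s = "" then (if cur = [] then pvHH [] t else cur :: pvHH [] t) else pvHH (cur ++ [s]) t

def pvGlue : List (List String) → List String
  | [] => []
  | [p] => p
  | p :: q :: rest => p ++ [""] ++ pvGlue (q :: rest)

theorem pvFoldA (L : List String) (acc : List String) (pb : Bool) :
    (L.foldl (fun (st : List String × Bool) ln =>
        if ln = "" then (if st.2 then st.1 else st.1 ++ [""], true)
        else (st.1 ++ [ln], false)) (acc, pb)).1 = acc ++ pvGG pb L := by
  induction L generalizing acc pb with
  | nil => simp [pvGG]
  | cons s t ih =>
    simp only [List.foldl_cons, pvGG]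
    by_cases hs : s = "" <;> simp [hs] <;> cases pb <;> simp [ih]

theorem pvFoldB (L : List String) (accP : List (List String)) (cur : List String) :
    (fun (st : List (List String) × List String) =>
        if st.2 ≠ [] then st.1 ++ [st.2] else st.1)
      (L.foldl (fun (st : List (List String) × List String) ln =>
        if ln ≠ "" then (st.1, st.2 ++ [ln])
        else if st.2 ≠ [] then (st.1 ++ [st.2], [])
        else st) (accP, cur)) = accP ++ pvHH cur L := by
  induction L generalizing accP cur with
  | nil => by_cases h : cur = [] <;> simp [pvHH, h]
  | cons s t ih =>
    rw [List.foldl_cons]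
    by_cases hs : s = ""
    · by_cases hc : cur = []
      · have hstep : (if s ≠ "" then ((accP, cur).1, (accP, cur).2 ++ [s]) else if (accP, cur).2 ≠ [] then ((accP, cur).1 ++ [(accP, cur).2], ([] : List String)) else (accP, cur)) = (accP, cur) := by subst hc; simp [hs]
        rw [hstep, ih]
        simp [pvHH, hs, hc]
      · have hstep : (if s ≠ "" then ((accP, cur).1, (accP, cur).2 ++ [s]) else if (accP, cur).2 ≠ [] then ((accP, cur).1 ++ [(accP, cur).2], ([] : List String)) else (accP, cur)) = (accP ++ [cur], []) := by simp [hs, hc]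
        rw [hstep, ih]
        simp [pvHH, hs, hc]
    · have hstep : (if s ≠ "" then ((accP, cur).1, (accP, cur).2 ++ [s]) else if (accP, cur).2 ≠ [] then ((accP, cur).1 ++ [(accP, cur).2], ([] : List String)) else (accP, cur)) = (accP, cur ++ [s]) := by simp [hs]
      rw [hstep, ih]
      simp [pvHH, hs]

theorem pvHH_ne_nil (L : List String) (cur : List String) (h : cur ≠ []) : pvHH cur L ≠ [] := by
  induction L generalizing cur with
  | nil => simp [pvHH, h]
  | cons s t ih =>
    show pvHH cur (s :: t) ≠ []
    rw [pvHH]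
    by_cases hs : s = ""
    · simp only [hs, if_pos rfl, if_neg h]
      exact List.cons_ne_nil _ _
    · rw [if_neg hs]
      exact ih _ (by simp)

theorem pvHH_nil_eq_nil_iff (L : List String) : pvHH [] L = [] ↔ ∀ x ∈ L, x = "" := by
  induction L with
  | nil => simp [pvHH]
  | cons s t ih =>
    simp only [pvHH]
    by_cases hs : s = "" <;> simp [hs, ih]
    exact fun h => absurd h (pvHH_ne_nil t [s] (by simp))

theorem pvHH_mem (L : List String) (cur : List String) (hcur : ∀ x ∈ cur, x ≠ "")
    (p : List String) (hp : p ∈ pvHH cur L) : p ≠ [] ∧ ∀ x ∈ p, x ≠ "" ∧ (x ∈ cur ∨ x ∈ L) := by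
  induction L generalizing cur with
  | nil =>
    by_cases h : cur = [] <;> simp [pvHH, h] at hp
    subst hp
    exact ⟨h, fun x hx => ⟨hcur x hx, Or.inl hx⟩⟩
  | cons s t ih =>
    simp only [pvHH] at hp
    by_cases hs : s = "" <;> simp [hs] at hp
    · have step : p ∈ pvHH [] t → p ≠ [] ∧ ∀ x ∈ p, x ≠ "" ∧ (x ∈ cur ∨ x ∈ s :: t) := by
        intro hmem
        have := ih [] (by simp) hmem
        refine ⟨this.1, fun x hx => ⟨(this.2 x hx).1, Or.inr ?_⟩⟩
        rcases (this.2 x hx).2 with h | h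
        · simp at h
        · simp [h]
      by_cases hc : cur = [] <;> simp [hc] at hp
      · exact step hp
      · rcases hp with rfl | hp
        · exact ⟨hc, fun x hx => ⟨hcur x hx, Or.inl hx⟩⟩
        · exact step hp
    · have := ih (cur ++ [s])
        (by intro x hx
            rcases List.mem_append.mp hx with h | h
            · exact hcur x h
            · simp at h; simpa [h] using hs) hp
      refine ⟨this.1, fun x hx => ⟨(this.2 x hx).1, ?_⟩⟩
      rcases (this.2 x hx).2 with h | h
      · rcases List.mem_append.mp h with h | h
        · exact Or.inl h
        · simp at h
          exact Or.inr (by simp [h])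
      · exact Or.inr (by simp [h])

theorem pvGlue_ne_nil (p : List String) (P : List (List String)) (hp : p ≠ []) :
    pvGlue (p :: P) ≠ [] := by
  cases P <;> simp [pvGlue, hp]

theorem pvGlue_head? (p : List String) (P : List (List String)) (hp : p ≠ []) :
    (pvGlue (p :: P)).head? = p.head? := by
  cases P with
  | nil => rfl
  | cons q rest =>
    show (p ++ [""] ++ pvGlue (q :: rest)).head? = p.head?
    rw [List.append_assoc, List.head?_append]
    cases p with
    | nil => exact absurd rfl hp
    | cons a as => rfl

theorem pvGlue_getLast? (P : List (List String)) (p : List String)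
    (h : P.getLast? = some p) (hp : p ≠ []) : (pvGlue P).getLast? = p.getLast? := by
  induction P with
  | nil => simp at h
  | cons q rest ih =>
    cases rest with
    | nil => simp at h; subst h; rfl
    | cons r rest' =>
      have h' : (r :: rest').getLast? = some p := by
        simpa [List.getLast?_cons_cons] using h
      have hglue := ih h'
      obtain ⟨c, hc⟩ := Option.isSome_iff_exists.mp ((List.getLast?_isSome).mpr hp)
      show (q ++ [""] ++ pvGlue (r :: rest')).getLast? = p.getLast?
      rw [List.getLast?_append, hglue, hc]
      rfl

theorem pvGG_blank (pb : Bool) (t : List String) :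
    pvGG pb ("" :: t) = (if pb then pvGG true t else "" :: pvGG true t) := by
  rw [pvGG, if_pos rfl]

theorem pvGG_cons (pb : Bool) (s : String) (t : List String) (hs : s ≠ "") :
    pvGG pb (s :: t) = s :: pvGG false t := by
  rw [pvGG, if_neg hs]

theorem pvHH_blank (cur : List String) (t : List String) :
    pvHH cur ("" :: t) = (if cur = [] then pvHH [] t else cur :: pvHH [] t) := by
  rw [pvHH, if_pos rfl]

theorem pvHH_cons (cur : List String) (s : String) (t : List String) (hs : s ≠ "") :
    pvHH cur (s :: t) = pvHH (cur ++ [s]) t := by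
  rw [pvHH, if_neg hs]

theorem pvGetLast_cons (a : String) (t : List String) :
    (a :: t).getLast? = (if t = [] then some a else t.getLast?) := by
  cases t with
  | nil => simp
  | cons b u => simp [List.getLast?_cons_cons]

theorem pvLast_all_blank (t : List String) (ht : t ≠ []) (hall : ∀ x ∈ t, x = "") :
    t.getLast? = some "" := by
  rw [List.getLast?_eq_some_getLast ht]
  exact congrArg some (hall _ (List.getLast_mem ht))

theorem pvS (L : List String) :
    (pvGG true L = pvGlue (pvHH [] L) ++ (if L.getLast? = some "" ∧ pvHH [] L ≠ [] then [""] else []))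
    ∧ (∀ cur : List String, cur ≠ [] →
        cur ++ pvGG false L = pvGlue (pvHH cur L) ++ (if L.getLast? = some "" then [""] else [])) := by
  induction L with
  | nil =>
    refine ⟨by simp [pvGG, pvHH, pvGlue], fun cur hc => ?_⟩
    simp [pvGG, pvHH, pvGlue, hc]
  | cons s t ih =>
    obtain ⟨ihA, ihB⟩ := ih
    constructor
    · by_cases hs : s = ""
      · subst hs
        rw [pvGG_blank, if_pos rfl, pvHH_blank, if_pos rfl, ihA]
        congr 1
        by_cases ht : t = []
        · subst ht; simp [pvHH]
        · rw [pvGetLast_cons, if_neg ht]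
      · rw [pvGG_cons _ _ _ hs, pvHH_cons _ _ _ hs, List.nil_append]
        have hne := pvHH_ne_nil t [s] (by simp)
        have hB := ihB [s] (by simp)
        have hiff : ((s :: t).getLast? = some "" ∧ pvHH [s] t ≠ []) = (t.getLast? = some "") := by
          apply propext
          rw [pvGetLast_cons]
          by_cases ht : t = []
          · simp [ht, hs]
          · simp [ht, hne]
        simp only [hiff]
        rw [← hB]
        simp
    · intro cur hcur
      by_cases hs : s = ""
      · subst hs
        rw [pvGG_blank, pvHH_blank, if_neg hcur]
        simp only [Bool.false_eq_true, if_false]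
        by_cases hP : pvHH [] t = []
        · have hall : ∀ x ∈ t, x = "" := (pvHH_nil_eq_nil_iff t).mp hP
          have hGG : pvGG true t = [] := by
            rw [ihA, hP]
            simp [pvGlue, hP]
          have hlast : ("" :: t).getLast? = some "" := by
            by_cases ht : t = []
            · simp [ht]
            · rw [pvGetLast_cons, if_neg ht]
              exact pvLast_all_blank t ht hall
          rw [hGG, hlast, hP]
          simp [pvGlue]
        · obtain ⟨q, Q, hq⟩ : ∃ q Q, pvHH [] t = q :: Q := by
            cases hPP : pvHH [] t with
            | nil => exact absurd hPP hP
            | cons q Q => exact ⟨q, Q, rfl⟩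
          have ht : t ≠ [] := by
            intro h; subst h; simp [pvHH] at hq
          have hlast : ("" :: t).getLast? = t.getLast? := by
            rw [pvGetLast_cons, if_neg ht]
          rw [ihA, hq, hlast]
          have hT : (t.getLast? = some "" ∧ (q :: Q : List (List String)) ≠ []) = (t.getLast? = some "") := by
            apply propext; simp
          simp only [hT]
          show cur ++ "" :: (pvGlue (q :: Q) ++ _) = pvGlue (cur :: q :: Q) ++ _
          rw [pvGlue]
          simp
      · rw [pvGG_cons _ _ _ hs, pvHH_cons _ _ _ hs]
        have hB := ihB (cur ++ [s]) (by simp)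
        have hlast : ((s :: t).getLast? = some "") = (t.getLast? = some "") := by
          apply propext
          rw [pvGetLast_cons]
          by_cases ht : t = []
          · simp [ht, hs]
          · simp [ht]
        simp only [hlast]
        rw [← hB]
        simp

theorem pvLstrip_idem (s : List Char) :
    PySem.Chars.lstrip (PySem.Chars.lstrip s) = PySem.Chars.lstrip s := by
  simp [PySem.Chars.lstrip, List.dropWhile_idempotent]

theorem pvRstrip_idem (s : List Char) :
    PySem.Chars.rstrip (PySem.Chars.rstrip s) = PySem.Chars.rstrip s := by
  simp [PySem.Chars.rstrip, List.reverse_reverse, List.dropWhile_idempotent]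

theorem pvRstrip_prefix (t : List Char) : PySem.Chars.rstrip t <+: t := by
  have h := List.dropWhile_suffix (l := t.reverse) (p := PySem.Chars.isspace)
  have := List.reverse_prefix.mpr h
  simpa [PySem.Chars.rstrip] using this

theorem pvHead_not_ws (s : List Char) (h : PySem.Chars.lstrip s = s) (c : Char)
    (hc : s.head? = some c) : PySem.Chars.isspace c = false := by
  cases s with
  | nil => simp at hc
  | cons a as =>
    have ha : a = c := by simpa using hc
    by_cases hws : PySem.Chars.isspace a = true
    · exfalso
      rw [PySem.Chars.lstrip, List.dropWhile_cons, if_pos hws] at h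
      have hlen := congrArg List.length h
      have := List.length_dropWhile_le (p := PySem.Chars.isspace) (l := as)
      simp at hlen
      omega
    · rw [← ha]
      simpa using hws

theorem pvLast_not_ws (s : List Char) (h : PySem.Chars.rstrip s = s) (c : Char)
    (hc : s.getLast? = some c) : PySem.Chars.isspace c = false := by
  have h' : PySem.Chars.lstrip s.reverse = s.reverse := by
    have := congrArg List.reverse h
    rw [PySem.Chars.rstrip, List.reverse_reverse] at this
    exact this
  exact pvHead_not_ws s.reverse h' c (by rw [List.head?_reverse]; exact hc)

theorem pvLstrip_rstrip (t : List Char) (h : PySem.Chars.lstrip t = t) :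
    PySem.Chars.lstrip (PySem.Chars.rstrip t) = PySem.Chars.rstrip t := by
  cases ht : t with
  | nil => subst ht; rfl
  | cons c cs =>
    subst ht
    have hc := pvHead_not_ws _ h c rfl
    have hp := pvRstrip_prefix (c :: cs)
    cases hr : PySem.Chars.rstrip (c :: cs) with
    | nil => rfl
    | cons d ds =>
      rw [hr] at hp
      obtain ⟨hd, -⟩ := List.cons_prefix_cons.mp hp
      subst hd
      rw [PySem.Chars.lstrip, List.dropWhile_cons, if_neg (by simp [hc])]

theorem pvLstrip_strip (s : List Char) :
    PySem.Chars.lstrip (PySem.Chars.strip s) = PySem.Chars.strip s := by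
  rw [PySem.Chars.strip]
  exact pvLstrip_rstrip _ (pvLstrip_idem s)

theorem pvStrip_idem (s : List Char) :
    PySem.Chars.strip (PySem.Chars.strip s) = PySem.Chars.strip s := by
  calc PySem.Chars.strip (PySem.Chars.strip s)
      = PySem.Chars.rstrip (PySem.Chars.lstrip (PySem.Chars.strip s)) := rfl
    _ = PySem.Chars.rstrip (PySem.Chars.strip s) := by rw [pvLstrip_strip]
    _ = PySem.Chars.rstrip (PySem.Chars.rstrip (PySem.Chars.lstrip s)) := rfl
    _ = PySem.Chars.rstrip (PySem.Chars.lstrip s) := pvRstrip_idem _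
    _ = PySem.Chars.strip s := rfl

theorem pvSandwich (pre core post : List Char) (c d : Char)
    (hpre : ∀ x ∈ pre, PySem.Chars.isspace x = true) (hpost : ∀ x ∈ post, PySem.Chars.isspace x = true)
    (hc : core.head? = some c) (hcw : PySem.Chars.isspace c = false)
    (hd : core.getLast? = some d) (hdw : PySem.Chars.isspace d = false) :
    PySem.Chars.strip (pre ++ (core ++ post)) = core := by
  have hl : PySem.Chars.lstrip (pre ++ (core ++ post)) = core ++ post := by
    rw [PySem.Chars.lstrip, List.dropWhile_append]
    have hpre' : List.dropWhile PySem.Chars.isspace pre = [] := by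
      rw [List.dropWhile_eq_nil_iff]
      exact fun x hx => hpre x hx
    rw [hpre']
    simp only [List.isEmpty_nil, eq_self_iff_true, if_true]
    obtain ⟨a, as, rfl⟩ : ∃ a as, core = a :: as := by
      cases core with
      | nil => simp at hc
      | cons a as => exact ⟨a, as, rfl⟩
    have haw : PySem.Chars.isspace a = false := by
      have hac : a = c := by simpa using hc
      rw [hac]; exact hcw
    rw [List.cons_append, List.dropWhile_cons, if_neg (by rw [haw]; exact Bool.false_ne_true)]
  rw [PySem.Chars.strip, hl, PySem.Chars.rstrip, List.reverse_append, List.dropWhile_append]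
  have hpost' : List.dropWhile PySem.Chars.isspace post.reverse = [] := by
    rw [List.dropWhile_eq_nil_iff]
    exact fun x hx => hpost x (List.mem_reverse.mp hx)
  rw [hpost']
  simp only [List.isEmpty_nil, eq_self_iff_true, if_true]
  cases hrev : core.reverse with
  | nil =>
    exfalso
    rw [← List.head?_reverse, hrev] at hd
    simp at hd
  | cons e es =>
    have he : e = d := by
      rw [← List.head?_reverse, hrev] at hd
      simpa using hd
    subst he
    simp only [List.dropWhile_cons]
    rw [if_neg (by rw [hdw]; exact Bool.false_ne_true)]
    rw [← hrev, List.reverse_reverse]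

theorem pvJoin_append (sep : List Char) (a b : List (List Char)) (ha : a ≠ []) (hb : b ≠ []) :
    PySem.Chars.join sep (a ++ b) = PySem.Chars.join sep a ++ sep ++ PySem.Chars.join sep b := by
  induction a with
  | nil => exact absurd rfl ha
  | cons x a' ih =>
    cases a' with
    | nil =>
      cases b with
      | nil => exact absurd rfl hb
      | cons y bs =>
        rw [List.singleton_append, PySem.Chars.join_cons_cons, PySem.Chars.join_singleton]
    | cons z a'' =>
      have h1 : (x :: z :: a'') ++ b = x :: z :: (a'' ++ b) := by simp
      rw [h1, PySem.Chars.join_cons_cons, PySem.Chars.join_cons_cons]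
      have := ih (by simp)
      rw [List.cons_append] at this
      rw [this]
      simp

theorem pvJoin_head? (Q : List String) (q : String) (hq : Q.head? = some q) (hne : q.toList ≠ []) :
    (PySem.Chars.join ['\n'] (Q.map String.toList)).head? = q.toList.head? := by
  cases Q with
  | nil => simp at hq
  | cons q' rest =>
    have hq' : q' = q := by simpa using hq
    subst hq'
    cases rest with
    | nil => simp [PySem.Chars.join_singleton]
    | cons r rest' =>
      rw [List.map_cons, List.map_cons, PySem.Chars.join_cons_cons]
      obtain ⟨a, as, hql⟩ : ∃ a as, q'.toList = a :: as := by
        cases h : q'.toList with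
        | nil => exact absurd h hne
        | cons a as => exact ⟨a, as, rfl⟩
      simp [hql]

theorem pvJoin_getLast? (Q : List String) (q : String) (hq : Q.getLast? = some q) (hne : q.toList ≠ []) :
    (PySem.Chars.join ['\n'] (Q.map String.toList)).getLast? = q.toList.getLast? := by
  induction Q with
  | nil => simp at hq
  | cons q' rest ih =>
    cases rest with
    | nil =>
      have hq' : q' = q := by simpa using hq
      subst hq'
      simp [PySem.Chars.join_singleton]
    | cons r rest' =>
      have h' : (r :: rest').getLast? = some q := by
        simpa [List.getLast?_cons_cons] using hq
      have hJ := ih h'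
      obtain ⟨c, hc⟩ := Option.isSome_iff_exists.mp ((List.getLast?_isSome).mpr hne)
      rw [List.map_cons, List.map_cons, PySem.Chars.join_cons_cons, List.getLast?_append,
        ← List.map_cons, hJ, hc]
      rfl

theorem pvJoin2_glue (P : List (List String)) (hP : P ≠ []) (hp : ∀ p ∈ P, p ≠ []) :
    PySem.Chars.join ['\n'] ((pvGlue P).map String.toList)
      = PySem.Chars.join ['\n', '\n'] (P.map (fun p => PySem.Chars.join ['\n'] (p.map String.toList))) := by
  induction P with
  | nil => exact absurd rfl hP
  | cons p rest ih =>
    cases rest with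
    | nil => simp [pvGlue, PySem.Chars.join_singleton]
    | cons r rest' =>
      have hpne : p ≠ [] := hp p (by simp)
      have hrne : r ≠ [] := hp r (by simp)
      have hglue : pvGlue (r :: rest') ≠ [] := pvGlue_ne_nil r rest' hrne
      show PySem.Chars.join ['\n'] ((p ++ [""] ++ pvGlue (r :: rest')).map String.toList) = _
      rw [List.append_assoc, List.map_append]
      rw [pvJoin_append ['\n'] (p.map String.toList) (([""] ++ pvGlue (r :: rest')).map String.toList)
        (by simpa using hpne) (by simp)]
      have hmap : (([""] ++ pvGlue (r :: rest')).map String.toList)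
          = ([] : List Char) :: (pvGlue (r :: rest')).map String.toList := by simp
      rw [hmap]
      cases hG : (pvGlue (r :: rest')).map String.toList with
      | nil => exact absurd (List.map_eq_nil_iff.mp hG) hglue
      | cons g gs =>
        rw [PySem.Chars.join_cons_cons, ← hG]
        have := ih (by simp) (fun x hx => hp x (List.mem_cons_of_mem p hx))
        rw [this]
        have hR : PySem.Chars.join ['\n', '\n'] (List.map (fun p => PySem.Chars.join ['\n'] (p.map String.toList)) (p :: r :: rest'))
            = PySem.Chars.join ['\n'] (p.map String.toList) ++ ['\n', '\n']
              ++ PySem.Chars.join ['\n', '\n'] (List.map (fun p => PySem.Chars.join ['\n'] (p.map String.toList)) (r :: rest')) := by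
          simp only [List.map_cons]
          rw [PySem.Chars.join_cons_cons]
        rw [hR]
        simp

theorem pvStr_ne_empty_toList (s : String) (h : s ≠ "") : s.toList ≠ [] := by
  intro hl
  exact h (String.toList_inj.mp (by simpa using hl))

theorem pvFinal (P : List (List String)) (lb tb : List String)
    (hlb : lb = [] ∨ lb = [""]) (htb : tb = [] ∨ tb = [""]) (hP : P ≠ [])
    (hfacts : ∀ p ∈ P, p ≠ [] ∧ ∀ x ∈ p, x ≠ "" ∧ PySem.Chars.strip x.toList = x.toList) :
    PySem.Str.strip (PySem.Str.join "\n" (lb ++ (pvGlue P ++ tb)))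
      = PySem.Str.join "\n\n" (P.map (fun p => PySem.Str.join "\n" p)) := by
  refine String.toList_inj.mp ?_
  rw [PySem.Str.toList_strip, PySem.Str.toList_join, PySem.Str.toList_join]
  have hnl : ("\n" : String).toList = ['\n'] := rfl
  have hnn : ("\n\n" : String).toList = ['\n', '\n'] := rfl
  rw [hnl, hnn]
  obtain ⟨p, rest, rfl⟩ : ∃ p rest, P = p :: rest := by
    cases P with
    | nil => exact absurd rfl hP
    | cons p rest => exact ⟨p, rest, rfl⟩
  have hpfact := hfacts p (by simp)
  have hpne : p ≠ [] := hpfact.1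
  have hglue_ne : pvGlue (p :: rest) ≠ [] := pvGlue_ne_nil p rest hpne
  have hGne : (pvGlue (p :: rest)).map String.toList ≠ [] := by
    simpa using hglue_ne
  -- head of the glued line list
  obtain ⟨s0, p', rfl⟩ : ∃ s0 p', p = s0 :: p' := by
    cases p with
    | nil => exact absurd rfl hpne
    | cons s0 p' => exact ⟨s0, p', rfl⟩
  have hs0 := hpfact.2 s0 (by simp)
  have hs0ne : s0.toList ≠ [] := pvStr_ne_empty_toList s0 hs0.1
  have hlstr0 : PySem.Chars.lstrip s0.toList = s0.toList := by
    have h1 := pvLstrip_strip s0.toList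
    rw [hs0.2] at h1
    exact h1
  obtain ⟨a, as0, ha⟩ : ∃ a as0, s0.toList = a :: as0 := by
    cases h : s0.toList with
    | nil => exact absurd h hs0ne
    | cons a as0 => exact ⟨a, as0, rfl⟩
  have haw : PySem.Chars.isspace a = false :=
    pvHead_not_ws s0.toList hlstr0 a (by rw [ha]; rfl)
  have hheadG : (pvGlue ((s0 :: p') :: rest)).head? = some s0 := by
    rw [pvGlue_head? _ _ hpne]; rfl
  set core := PySem.Chars.join ['\n'] ((pvGlue ((s0 :: p') :: rest)).map String.toList) with hcore
  have hcore_head : core.head? = some a := by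
    rw [hcore, pvJoin_head? _ s0 hheadG hs0ne, ha]; rfl
  -- last of the glued line list
  have hPlast : ∃ pl, ((s0 :: p') :: rest).getLast? = some pl ∧ pl ∈ (s0 :: p') :: rest := by
    obtain ⟨pl, hpl⟩ := Option.isSome_iff_exists.mp ((List.getLast?_isSome).mpr (List.cons_ne_nil _ _))
    exact ⟨pl, hpl, List.mem_of_getLast? hpl⟩
  obtain ⟨pl, hpl, hplmem⟩ := hPlast
  have hplfact := hfacts pl hplmem
  obtain ⟨sl, hsl⟩ := Option.isSome_iff_exists.mp ((List.getLast?_isSome).mpr hplfact.1)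
  have hslfact := hplfact.2 sl (List.mem_of_getLast? hsl)
  have hslne : sl.toList ≠ [] := pvStr_ne_empty_toList sl hslfact.1
  have hrstr : PySem.Chars.rstrip sl.toList = sl.toList := by
    have h1 : PySem.Chars.rstrip (PySem.Chars.strip sl.toList) = PySem.Chars.strip sl.toList := by
      show PySem.Chars.rstrip (PySem.Chars.rstrip (PySem.Chars.lstrip sl.toList)) = _
      rw [pvRstrip_idem]
      rfl
    rw [hslfact.2] at h1
    exact h1
  obtain ⟨d, hd⟩ := Option.isSome_iff_exists.mp ((List.getLast?_isSome).mpr hslne)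
  have hdw : PySem.Chars.isspace d = false := pvLast_not_ws sl.toList hrstr d hd
  have hlastG : (pvGlue ((s0 :: p') :: rest)).getLast? = some sl := by
    rw [pvGlue_getLast? _ pl hpl hplfact.1, hsl]
  have hcore_last : core.getLast? = some d := by
    rw [hcore, pvJoin_getLast? _ sl hlastG hslne, hd]
  -- decompose the join into pre ++ (core ++ post)
  have hJ : PySem.Chars.join ['\n'] ((lb ++ (pvGlue ((s0 :: p') :: rest) ++ tb)).map String.toList)
      = (if lb = [] then [] else ['\n']) ++ (core ++ (if tb = [] then [] else ['\n'])) := by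
    rcases hlb with rfl | rfl <;> rcases htb with rfl | rfl
    · simp [hcore]
    · rw [List.nil_append, List.map_append,
        pvJoin_append ['\n'] _ _ hGne (by simp)]
      simp [hcore, PySem.Chars.join_singleton]
    · have he : ([""] : List String) ++ (pvGlue ((s0 :: p') :: rest) ++ ([] : List String))
          = "" :: pvGlue ((s0 :: p') :: rest) := by simp
      rw [he]
      have h4 : (("" :: pvGlue ((s0 :: p') :: rest)).map String.toList)
          = [] :: (pvGlue ((s0 :: p') :: rest)).map String.toList := by simp
      rw [h4]
      cases hG : (pvGlue ((s0 :: p') :: rest)).map String.toList with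
      | nil => exact absurd hG hGne
      | cons g gs =>
        rw [PySem.Chars.join_cons_cons, ← hG]
        simp [hcore]
    · have h3 : ([""] : List String) ++ (pvGlue ((s0 :: p') :: rest) ++ [""]) =
          ("" :: pvGlue ((s0 :: p') :: rest)) ++ [""] := by simp
      rw [h3, List.map_append,
        pvJoin_append ['\n'] _ _ (by simp) (by simp)]
      have h4 : (("" :: pvGlue ((s0 :: p') :: rest)).map String.toList)
          = [] :: (pvGlue ((s0 :: p') :: rest)).map String.toList := by simp
      rw [h4]
      cases hG : (pvGlue ((s0 :: p') :: rest)).map String.toList with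
      | nil => exact absurd hG hGne
      | cons g gs =>
        rw [PySem.Chars.join_cons_cons, ← hG]
        simp [hcore, PySem.Chars.join_singleton]
  rw [hJ]
  have hsand := pvSandwich (if lb = [] then [] else ['\n']) core (if tb = [] then [] else ['\n'])
    a d (by split_ifs <;> simp; rfl) (by split_ifs <;> simp; rfl)
    hcore_head haw hcore_last hdw
  rw [hsand]
  rw [List.map_map]
  have hcomp : (String.toList ∘ fun p => PySem.Str.join "\n" p)
      = fun p => PySem.Chars.join ['\n'] (p.map String.toList) := by
    funext p
    simp [PySem.Str.toList_join]
  rw [hcomp]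
  exact pvJoin2_glue _ (by simp) (fun q hq => (hfacts q hq).1)

theorem pvMain (L : List String) (hLstr : ∀ x ∈ L, PySem.Chars.strip x.toList = x.toList) :
    PySem.Str.strip (PySem.Str.join "\n" (pvGG false L))
      = PySem.Str.join "\n\n" ((pvHH [] L).map (fun p => PySem.Str.join "\n" p)) := by
  cases L with
  | nil =>
    rw [pvGG, pvHH]
    decide
  | cons s t =>
    by_cases hs : s = ""
    · subst hs
      rw [pvGG_blank, pvHH_blank, if_pos rfl]
      simp only [Bool.false_eq_true, if_false]
      rw [(pvS t).1]
      by_cases hP : pvHH [] t = []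
      · have hcond : (t.getLast? = some "" ∧ pvHH [] t ≠ []) = False := by
          simp [hP]
        simp only [hcond, if_false]
        rw [hP]
        simp only [pvGlue, if_false, List.nil_append, List.append_nil, List.map_nil]
        decide
      · have hfacts : ∀ p ∈ pvHH [] t, p ≠ [] ∧ ∀ x ∈ p, x ≠ "" ∧ PySem.Chars.strip x.toList = x.toList := by
          intro p hp
          obtain ⟨h1, h2⟩ := pvHH_mem t [] (by simp) p hp
          refine ⟨h1, fun y hy => ⟨(h2 y hy).1, ?_⟩⟩
          rcases (h2 y hy).2 with h | h
          · simp at h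
          · exact hLstr y (List.mem_cons_of_mem _ h)
        have hfin := pvFinal (pvHH [] t) [""]
          (if t.getLast? = some "" ∧ pvHH [] t ≠ [] then [""] else [])
          (Or.inr rfl) (by split_ifs <;> simp) hP hfacts
        rw [List.singleton_append] at hfin
        exact hfin
    · rw [pvGG_cons _ _ _ hs, pvHH_cons _ _ _ hs, List.nil_append]
      have hB2 := (pvS t).2 [s] (by simp)
      rw [List.singleton_append] at hB2
      rw [hB2]
      have hP : pvHH [s] t ≠ [] := pvHH_ne_nil t [s] (by simp)
      have hfacts : ∀ p ∈ pvHH [s] t, p ≠ [] ∧ ∀ x ∈ p, x ≠ "" ∧ PySem.Chars.strip x.toList = x.toList := by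
        intro p hp
        obtain ⟨h1, h2⟩ := pvHH_mem t [s] (by simpa using hs) p hp
        refine ⟨h1, fun y hy => ⟨(h2 y hy).1, ?_⟩⟩
        rcases (h2 y hy).2 with h | h
        · simp at h
          exact hLstr y (by rw [h]; exact List.mem_cons_self ..)
        · exact hLstr y (List.mem_cons_of_mem _ h)
      have hfin := pvFinal (pvHH [s] t) []
        (if t.getLast? = some "" then [""] else [])
        (Or.inl rfl) (by split_ifs <;> simp) hP hfacts
      rw [List.nil_append] at hfin
      exact hfin

theorem normalize_notes_main (notes : String) :
    normalize_notes_py notes = normalize_notes_py_alt notes := by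
  unfold normalize_notes_py normalize_notes_py_alt
  by_cases hg : notes = "" ∨ PySem.Str.strip notes = ""
  · rw [if_pos hg, if_pos hg]
  · rw [if_neg hg, if_neg hg]
    simp only []
    have hfold : (PySem.Str.splitlines notes).foldl
        (fun (st : List (List String) × List String) line =>
          let ln := PySem.Str.strip line
          if ln ≠ "" then (st.1, st.2 ++ [ln])
          else if st.2 ≠ [] then (st.1 ++ [st.2], [])
          else st) ([], [])
        = ((PySem.Str.splitlines notes).map (fun line => PySem.Str.strip line)).foldl
          (fun (st : List (List String) × List String) ln =>
          if ln ≠ "" then (st.1, st.2 ++ [ln])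
          else if st.2 ≠ [] then (st.1 ++ [st.2], [])
          else st) ([], []) := by
      rw [List.foldl_map]
    rw [hfold]
    have hA := pvFoldA ((PySem.Str.splitlines notes).map (fun line => PySem.Str.strip line)) [] false
    rw [hA, List.nil_append]
    have hB := pvFoldB ((PySem.Str.splitlines notes).map (fun line => PySem.Str.strip line)) [] []
    simp only [] at hB
    rw [hB, List.nil_append]
    apply pvMain
    intro x hx
    obtain ⟨y, -, rfl⟩ := List.mem_map.mp hx
    rw [PySem.Str.toList_strip]
    exact pvStrip_idem _

-- ===== VERDICT (by name: the statement is the Claim_ definition above) =====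
theorem normalize_notes_py_spec : Claim_equal_normalize_notes_py := by
  intro notes _
  unfold Spec_normalize_notes_py
  exact normalize_notes_main notes
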